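-- pv_equiv track=rewrite | github.com/jasperzhong/swift | torch/hermetic/importer.py | _get_all_files
-- ===== SOURCE A (Python) =====
-- def _get_all_files(filelist):
--     # zip files don't always expictly list directories
--     # so if we see foo/bar.py, add foo as a directory
--     files = {} # name -> is_directory
--     for file in filelist:
--         # if we have already seen this file as part of a path
--         # then it must be a directory, eventhough it is explicitly
--         # written as an entry in the zip file. Otherwise,
--         # it is a regular file.
--         if file not in files:
--             files[file] = 'regular'
--         components = file.split('/')
--         for i in range(1, len(components)):
--             files['/'.join(components[:-i])] = 'directory'
--     return files
-- ===== SOURCE B (Python) =====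
-- def _get_all_files(filelist):
--     # Pass 1: flatten each path into its "mention chain" (the path itself, then
--     # every proper ancestor, deepest first) and index all ancestors in a set.
--     dirs = set()
--     mentions = []
--     for file in filelist:
--         comps = file.split('/')
--         chain = ['/'.join(comps[:j]) for j in range(len(comps), 0, -1)]
--         mentions.extend(chain)
--         dirs.update(chain[1:])
--     # Pass 2: keep the first occurrence of each mentioned name, classifying it
--     # against the precomputed ancestor index.
--     files = {}
--     seen = set()
--     for name in mentions:
--         if name not in seen:
--             seen.add(name)
--             files[name] = 'directory' if name in dirs else 'regular'
--     return files
-- ===== Notes on version B (the rewrite author's own statement) =====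
-- stated objective: alternative
-- what changed: A builds the dict in one interleaved pass, inserting each file and then upgrading/inserting its ancestors ('/'-prefixes) with in-place overwrites; B first flattens every path into its mention chain and indexes all proper ancestors in a set, then a second dedup pass emits each mentioned name once, classified against that precomputed index, so no entry is ever overwritten.
import Mathlib
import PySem

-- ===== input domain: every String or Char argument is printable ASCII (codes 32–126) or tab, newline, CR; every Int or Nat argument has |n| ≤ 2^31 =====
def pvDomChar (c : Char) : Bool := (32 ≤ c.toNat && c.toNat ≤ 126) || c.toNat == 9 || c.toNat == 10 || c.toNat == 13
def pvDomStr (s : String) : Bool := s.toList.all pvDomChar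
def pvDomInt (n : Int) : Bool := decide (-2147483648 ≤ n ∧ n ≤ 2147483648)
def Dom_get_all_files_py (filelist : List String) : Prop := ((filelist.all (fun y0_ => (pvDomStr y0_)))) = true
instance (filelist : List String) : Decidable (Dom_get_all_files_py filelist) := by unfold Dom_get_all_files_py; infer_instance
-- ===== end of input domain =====

-- B re-decomposes A's single interleaved dict-mutation pass into two passes (flatten every path
-- into its mention chain and index all proper ancestors in a set, then one dedup-classify pass
-- builds the dict); same return value, no speed claim.

-- ===== PORT A =====
def get_all_files_py (filelist : List String) : List (String × String) :=
  (filelist.foldl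
    (fun (files : PySem.Dict String String) file =>
      -- if file not in files: files[file] = 'regular'
      let files := if files.contains file then files else files.insert file "regular"
      -- components = file.split('/')   ('/' is a nonempty separator, so split? never returns none)
      let components := (PySem.Str.split? file "/").getD []
      -- for i in range(1, len(components)): files['/'.join(components[:-i])] = 'directory'
      (PySem.List.pyRange 1 (PySem.List.len components) 1).foldl
        (fun files i =>
          files.insert (PySem.Str.join "/" (PySem.List.slice components none (some (-i)))) "directory")
        files)
    PySem.Dict.empty).items

-- ===== PORT B =====
def get_all_files_py_alt (filelist : List String) : List (String × String) :=
  -- pass 1: dirs (the ancestor index) and the flat mention stream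
  let p := filelist.foldl
    (fun (p : PySem.Set String × List String) file =>
      let comps := (PySem.Str.split? file "/").getD []
      -- chain = ['/'.join(comps[:j]) for j in range(len(comps), 0, -1)]
      let chain := (PySem.List.pyRange (PySem.List.len comps) 0 (-1)).map
        (fun j => PySem.Str.join "/" (PySem.List.slice comps none (some j)))
      (PySem.Set.update p.1 (chain.drop 1), p.2 ++ chain))
    (PySem.Set.empty, [])
  let dirs := p.1
  -- pass 2: first occurrence of each mentioned name, classified against dirs
  ((p.2.foldl
      (fun (q : PySem.Dict String String × PySem.Set String) name =>
        if PySem.Set.contains q.2 name then q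
        else (q.1.insert name (if PySem.Set.contains dirs name then "directory" else "regular"),
              PySem.Set.add q.2 name))
      (PySem.Dict.empty, PySem.Set.empty)).1).items

-- ===== PRECONDITION & SPEC =====
def Spec_get_all_files_py (filelist : List String) (out : List (String × String)) : Prop := out = get_all_files_py_alt filelist
instance (filelist : List String) (out : List (String × String)) : Decidable (Spec_get_all_files_py filelist out) := by unfold Spec_get_all_files_py; infer_instance

-- ===== CLAIM (what is proved, stated in full; the proofs are below) =====
def Claim_equal_get_all_files_py : Prop := ∀ (filelist : List String), Dom_get_all_files_py filelist → Spec_get_all_files_py filelist (get_all_files_py filelist)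

-- ===== LEMMAS AND PROOFS =====

def sp : List Char → List Char × List (List Char)
  | [] => ([], [])
  | c :: rest =>
    let r := sp rest
    if c = '/' then ([], r.1 :: r.2) else (c :: r.1, r.2)

lemma go_eq : ∀ (fuel : Nat) (l cur : List Char) (acc : List (List Char)),
    l.length < fuel →
    PySem.Chars.splitOn.go ['/'] fuel l cur acc
      = acc.reverse ++ (cur.reverse ++ (sp l).1) :: (sp l).2
  | fuel+1, [], cur, acc, _ => by
      simp [PySem.Chars.splitOn.go, sp]
  | fuel+1, c :: rest, cur, acc, h => by
      by_cases hc : c = '/'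
      · subst hc
        have ih := go_eq fuel rest [] ((cur.reverse) :: acc) (by simpa using h)
        simp [PySem.Chars.splitOn.go, List.isPrefixOf, sp] at ih ⊢
        simp [ih]
      · have hc' : ¬ ('/' = c) := fun h => hc h.symm
        have ih := go_eq fuel rest (c :: cur) acc (by simpa using h)
        simp [PySem.Chars.splitOn.go, List.isPrefixOf, hc', sp, hc] at ih ⊢
        simp [ih]

def pieces (f : String) : List String :=
  ((sp f.toList).1 :: (sp f.toList).2).map String.ofList
def joins (comps : List String) (m : Nat) : String :=
  PySem.Str.join "/" (comps.take m)
def ancestorsOf (comps : List String) : List String :=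
  (List.range (comps.length - 1)).map (fun k => joins comps (comps.length - 1 - k))
def mentionsOf (comps : List String) : List String :=
  joins comps comps.length :: ancestorsOf comps

lemma pieces_eq (f : String) : (PySem.Str.split? f "/").getD [] = pieces f := by
  have : PySem.Chars.splitOn f.toList ['/'] = (sp f.toList).1 :: (sp f.toList).2 := by
    rw [PySem.Chars.splitOn, go_eq (f.toList.length + 1) f.toList [] [] (by omega)]
    simp
  simp [PySem.Str.split?, PySem.Chars.split?, pieces, this]

lemma join_sp : ∀ (l : List Char), PySem.Chars.join ['/'] ((sp l).1 :: (sp l).2) = l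
  | [] => by simp [sp, PySem.Chars.join_singleton]
  | c :: rest => by
      have ih := join_sp rest
      by_cases hc : c = '/'
      · subst hc
        simp only [sp, if_true]
        rw [PySem.Chars.join_cons_cons]
        simpa using ih
      · simp only [sp]
        rw [if_neg hc]
        rcases hsp : (sp rest).2 with _ | ⟨q, qs⟩
        · rw [hsp] at ih
          simp [PySem.Chars.join_singleton] at ih ⊢
          simp [ih]
        · rw [hsp] at ih
          rw [PySem.Chars.join_cons_cons] at ih ⊢
          simp at ih ⊢
          simp [ih]

lemma joins_full (f : String) : joins (pieces f) (pieces f).length = f := by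
  simp only [joins, pieces, List.take_length, PySem.Str.join]
  rw [List.map_map]
  have : (String.toList ∘ String.ofList) = id := by funext l; simp
  rw [this, List.map_id]
  have := join_sp f.toList
  simp at this ⊢
  rw [this]  -- join ['/'] pieces = f.toList; String.ofList toList = f
  exact String.ofList_toList

lemma map_countdown (comps : List String) (m : Nat) :
    (PySem.List.pyRange (m : Int) 0 (-1)).map
        (fun j => PySem.Str.join "/" (PySem.List.slice comps none (some j)))
      = (List.range m).map (fun k => joins comps (m - k)) := by
  rw [PySem.List.pyRange_neg_one]
  simp only [Int.sub_zero, Int.toNat_natCast, List.map_map]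
  apply List.map_congr_left
  intro k hk
  simp only [List.mem_range] at hk
  have : (m : Int) - (k : Int) = ((m - k : Nat) : Int) := by omega
  simp only [Function.comp, this, PySem.List.slice_to_natCast]
  rfl

lemma chainA_eq (comps : List String) :
    (PySem.List.pyRange 1 (PySem.List.len comps) 1).map
        (fun i => PySem.Str.join "/" (PySem.List.slice comps none (some (-i))))
      = ancestorsOf comps := by
  rw [PySem.List.pyRange_one]
  have h1 : ((comps.length : Int) - 1).toNat = comps.length - 1 := by omega
  simp only [PySem.List.len_eq, h1, List.map_map, ancestorsOf]
  apply List.map_congr_left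
  intro k hk
  simp only [List.mem_range] at hk
  have h2 : -(1 + (k : Int)) = -(((k + 1 : Nat) : Int)) := by omega
  simp only [Function.comp, h2, PySem.List.slice_to_neg_natCast _ _ (Nat.succ_pos k)]
  have : comps.length - (k + 1) = comps.length - 1 - k := by omega
  rw [this]; rfl

lemma chainB_eq (comps : List String) (h : comps ≠ []) :
    (PySem.List.pyRange (PySem.List.len comps) 0 (-1)).map
        (fun j => PySem.Str.join "/" (PySem.List.slice comps none (some j)))
      = mentionsOf comps := by
  have hn : 0 < comps.length := List.length_pos_of_ne_nil h
  rw [PySem.List.len_eq, map_countdown]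
  obtain ⟨n, hn'⟩ : ∃ n, comps.length = n + 1 := ⟨comps.length - 1, by omega⟩
  rw [hn', List.range_succ_eq_map]
  simp only [List.map_cons, Nat.sub_zero, List.map_map, mentionsOf, ancestorsOf, hn']
  congr 1
  rw [Nat.add_sub_cancel]
  apply List.map_congr_left
  intro k hk
  simp only [Function.comp]
  congr 1
  omega

def valOf (S : List String) (k : String) : String := if k ∈ S then "directory" else "regular"
def mapitems (keys S : List String) : List (String × String) := keys.map (fun k => (k, valOf S k))
def mdict (keys S : List String) : PySem.Dict String String := PySem.Dict.mk (mapitems keys S)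

lemma valOf_congr {S S' : List String} (k : String) (h : ∀ a, a ∈ S ↔ a ∈ S') :
    valOf S k = valOf S' k := by
  simp only [valOf, h]

lemma mapitems_congr (keys : List String) {S S' : List String} (h : ∀ a, a ∈ S ↔ a ∈ S') :
    mapitems keys S = mapitems keys S' := by
  simp only [mapitems]
  exact List.map_congr_left (fun a _ => by rw [valOf_congr a h])

lemma contains_mdict (keys S : List String) (k : String) :
    (mdict keys S).contains k = decide (k ∈ keys) := by
  simp only [mdict, mapitems, PySem.Dict.contains, List.any_map]
  induction keys with
  | nil => simp
  | cons a rest ih =>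
    simp only [List.any_cons, ih, Function.comp, List.mem_cons]
    by_cases h : a = k
    · simp [h]
    · have h' : ¬ k = a := fun e => h e.symm
      simp [h, h']

lemma insert_dir (keys S : List String) (k : String) :
    (mdict keys S).insert k "directory" = mdict (PySem.Set.add keys k) (k :: S) := by
  by_cases h : k ∈ keys
  · have hc : (mdict keys S).contains k = true := by simp [contains_mdict, h]
    apply PySem.Dict.ext
    rw [PySem.Dict.items_insert_of_contains _ _ hc]
    have hadd : PySem.Set.add keys k = keys := by simp [PySem.Set.add, h]
    simp only [mdict, hadd, mapitems, List.map_map]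
    apply List.map_congr_left
    intro a _
    by_cases hak : a = k
    · simp [hak, valOf]
    · simp [Function.comp, valOf, hak]
  · have hc : (mdict keys S).contains k = false := by simp [contains_mdict, h]
    apply PySem.Dict.ext
    rw [PySem.Dict.items_insert_of_not_contains _ _ hc]
    have hadd : PySem.Set.add keys k = keys ++ [k] := by
      simp [PySem.Set.add]
      intro hk; exact absurd hk h
    simp only [mdict, hadd, mapitems, List.map_append, List.map_cons, List.map_nil]
    congr 1
    · apply List.map_congr_left
      intro a ha
      have : a ≠ k := fun he => h (he ▸ ha)
      simp [valOf, this]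
    · simp [valOf]

lemma insert_reg (keys S : List String) (k : String) (hk : k ∉ keys) (hS : k ∉ S) :
    (mdict keys S).insert k "regular" = mdict (keys ++ [k]) S := by
  have hc : (mdict keys S).contains k = false := by simp [contains_mdict, hk]
  apply PySem.Dict.ext
  rw [PySem.Dict.items_insert_of_not_contains _ _ hc]
  simp [mdict, mapitems, valOf, hS]

lemma fold_dir : ∀ (ps keys S : List String),
    ps.foldl (fun d k => d.insert k "directory") (mdict keys S)
      = mdict (PySem.Set.update keys ps) (ps ++ S)
  | [], keys, S => by simp [PySem.Set.update]
  | p :: rest, keys, S => by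
      rw [List.foldl_cons, insert_dir]
      rw [fold_dir rest (PySem.Set.add keys p) (p :: S)]
      have h1 : PySem.Set.update keys (p :: rest) = PySem.Set.update (PySem.Set.add keys p) rest := rfl
      rw [h1]
      unfold mdict
      congr 1
      apply mapitems_congr
      intro a
      simp
      tauto

def allMen (l : List String) : List String := l.flatMap (fun f => mentionsOf (pieces f))
def allAnc (l : List String) : List String := l.flatMap (fun f => ancestorsOf (pieces f))

def Astep : PySem.Dict String String → String → PySem.Dict String String :=
  fun files file =>
    let files := if files.contains file then files else files.insert file "regular"
    let components := (PySem.Str.split? file "/").getD []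
    (PySem.List.pyRange 1 (PySem.List.len components) 1).foldl
      (fun files i =>
        files.insert (PySem.Str.join "/" (PySem.List.slice components none (some (-i)))) "directory")
      files

def Bstep1 : PySem.Set String × List String → String → PySem.Set String × List String :=
  fun p file =>
    let comps := (PySem.Str.split? file "/").getD []
    let chain := (PySem.List.pyRange (PySem.List.len comps) 0 (-1)).map
      (fun j => PySem.Str.join "/" (PySem.List.slice comps none (some j)))
    (PySem.Set.update p.1 (chain.drop 1), p.2 ++ chain)

def Bstep2 (dirs : PySem.Set String) :
    PySem.Dict String String × PySem.Set String → String → PySem.Dict String String × PySem.Set String :=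
  fun q name =>
    if PySem.Set.contains q.2 name then q
    else (q.1.insert name (if PySem.Set.contains dirs name then "directory" else "regular"),
          PySem.Set.add q.2 name)

lemma fold_insert_map (comps : List String) : ∀ (L : List Int) (d : PySem.Dict String String),
    L.foldl (fun files i =>
        files.insert (PySem.Str.join "/" (PySem.List.slice comps none (some (-i)))) "directory") d
      = ((L.map (fun i => PySem.Str.join "/" (PySem.List.slice comps none (some (-i))))).foldl
          (fun d k => d.insert k "directory") d)
  | [], d => rfl
  | i :: L, d => by
      rw [List.foldl_cons, List.map_cons, List.foldl_cons]
      exact fold_insert_map comps L _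

lemma pieces_ne_nil (f : String) : pieces f ≠ [] := by unfold pieces; simp

set_option maxHeartbeats 1000000 in
lemma A_main : ∀ (l keys S : List String), (∀ a ∈ S, a ∈ keys) →
    l.foldl Astep (mdict keys S)
      = mdict (PySem.Set.update keys (allMen l)) (allAnc l ++ S)
  | [], keys, S, _ => rfl
  | f :: rest, keys, S, hsub => by
      rw [List.foldl_cons]
      have hstep : Astep (mdict keys S) f
          = mdict (PySem.Set.update (PySem.Set.add keys f) (ancestorsOf (pieces f)))
                  (ancestorsOf (pieces f) ++ S) := by
        unfold Astep
        have h1 : (if (mdict keys S).contains f then mdict keys S else (mdict keys S).insert f "regular")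
            = mdict (PySem.Set.add keys f) S := by
          by_cases hf : f ∈ keys
          · rw [if_pos (by simp [contains_mdict, hf])]
            have : PySem.Set.add keys f = keys := by simp [PySem.Set.add, hf]
            rw [this]
          · rw [if_neg (by simp [contains_mdict, hf])]
            rw [insert_reg keys S f hf (fun hfs => hf (hsub f hfs))]
            have : PySem.Set.add keys f = keys ++ [f] := by
              simp [PySem.Set.add]; intro hk; exact absurd hk hf
            rw [this]
        simp only [h1, pieces_eq]
        rw [fold_insert_map (pieces f), chainA_eq, fold_dir]
      rw [hstep, A_main rest _ _ (by
        intro a ha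
        have hm := List.mem_append.mp ha
        simp only [PySem.Set.mem_update, PySem.Set.mem_add]
        have : a ∈ S → a ∈ keys := hsub a
        tauto)]
      have hkeys : PySem.Set.update keys (allMen (f :: rest))
          = PySem.Set.update (PySem.Set.update (PySem.Set.add keys f) (ancestorsOf (pieces f))) (allMen rest) := by
        have : allMen (f :: rest) = mentionsOf (pieces f) ++ allMen rest := by simp [allMen]
        rw [this, PySem.Set.update_append]
        congr 1
        show PySem.Set.update keys (joins (pieces f) (pieces f).length :: ancestorsOf (pieces f)) = _
        rw [joins_full]
        rfl
      rw [hkeys]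
      unfold mdict
      congr 1
      apply mapitems_congr
      intro a
      simp only [allAnc, List.flatMap_cons, List.mem_append]
      tauto

lemma B_pass1 : ∀ (l : List String) (s : PySem.Set String) (m : List String),
    l.foldl Bstep1 (s, m) = (PySem.Set.update s (allAnc l), m ++ allMen l)
  | [], s, m => by simp [allMen, allAnc, PySem.Set.update]
  | f :: rest, s, m => by
      rw [List.foldl_cons]
      have hstep : Bstep1 (s, m) f
          = (PySem.Set.update s (ancestorsOf (pieces f)), m ++ mentionsOf (pieces f)) := by
        unfold Bstep1
        simp only [pieces_eq, chainB_eq (pieces f) (pieces_ne_nil f)]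
        rw [show (mentionsOf (pieces f)).drop 1 = ancestorsOf (pieces f) from rfl]
      rw [hstep, B_pass1 rest _ _]
      have h1 : allAnc (f :: rest) = ancestorsOf (pieces f) ++ allAnc rest := by simp [allAnc]
      have h2 : allMen (f :: rest) = mentionsOf (pieces f) ++ allMen rest := by simp [allMen]
      rw [h1, h2, PySem.Set.update_append, List.append_assoc]

lemma insert_fresh (keys S : List String) (k : String) (hk : k ∉ keys) :
    (mdict keys S).insert k (valOf S k) = mdict (keys ++ [k]) S := by
  have hc : (mdict keys S).contains k = false := by simp [contains_mdict, hk]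
  apply PySem.Dict.ext
  rw [PySem.Dict.items_insert_of_not_contains _ _ hc]
  simp [mdict, mapitems]

lemma B_pass2 (D : PySem.Set String) : ∀ (ms keys : List String),
    ms.foldl (Bstep2 D) (mdict keys D, keys)
      = (mdict (PySem.Set.update keys ms) D, PySem.Set.update keys ms)
  | [], keys => by simp [PySem.Set.update]
  | name :: rest, keys => by
      rw [List.foldl_cons]
      by_cases h : name ∈ keys
      · have hstep : Bstep2 D (mdict keys D, keys) name = (mdict keys D, keys) := by
          unfold Bstep2
          rw [if_pos (by simp [h])]
        have hadd : PySem.Set.add keys name = keys := by simp [PySem.Set.add, h]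
        rw [hstep, B_pass2 D rest keys]
        have : PySem.Set.update keys (name :: rest) = PySem.Set.update keys rest := by
          show PySem.Set.update (PySem.Set.add keys name) rest = _
          rw [hadd]
        rw [this]
      · have hval : (if PySem.Set.contains D name then "directory" else "regular") = valOf D name := by
          simp [valOf]
        have hstep : Bstep2 D (mdict keys D, keys) name = (mdict (keys ++ [name]) D, keys ++ [name]) := by
          unfold Bstep2
          rw [if_neg (by simp [h])]
          rw [hval, insert_fresh keys D name h]
          have : PySem.Set.add keys name = keys ++ [name] := by
            simp [PySem.Set.add]; intro hk; exact absurd hk h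
          rw [this]
        rw [hstep, B_pass2 D rest (keys ++ [name])]
        have : PySem.Set.update keys (name :: rest) = PySem.Set.update (keys ++ [name]) rest := by
          show PySem.Set.update (PySem.Set.add keys name) rest = _
          congr 1
          simp [PySem.Set.add]; intro hk; exact absurd hk h
        rw [this]

theorem final_eq (l : List String) : get_all_files_py l = get_all_files_py_alt l := by
  have hA : get_all_files_py l = (l.foldl Astep PySem.Dict.empty).items := rfl
  have hB : get_all_files_py_alt l =
      ((((l.foldl Bstep1 (PySem.Set.empty, [])).2).foldl
          (Bstep2 (l.foldl Bstep1 (PySem.Set.empty, [])).1)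
          (PySem.Dict.empty, PySem.Set.empty)).1).items := rfl
  rw [hA, hB, B_pass1 l PySem.Set.empty []]
  simp only [List.nil_append]
  rw [show ((PySem.Dict.empty, PySem.Set.empty) : PySem.Dict String String × PySem.Set String)
        = (mdict [] (PySem.Set.update PySem.Set.empty (allAnc l)), ([] : List String)) from rfl]
  rw [B_pass2 (PySem.Set.update PySem.Set.empty (allAnc l)) (allMen l) []]
  rw [show (PySem.Dict.empty : PySem.Dict String String) = mdict [] [] from rfl,
      A_main l [] [] (by simp)]
  show mapitems (PySem.Set.update [] (allMen l)) (allAnc l ++ [])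
      = mapitems (PySem.Set.update [] (allMen l)) (PySem.Set.update PySem.Set.empty (allAnc l))
  apply mapitems_congr
  intro a
  simp [PySem.Set.mem_update, PySem.Set.empty]

-- ===== VERDICT (by name: the statement is the Claim_ definition above) =====
theorem get_all_files_py_spec : Claim_equal_get_all_files_py := by
  intro filelist _
  show get_all_files_py filelist = get_all_files_py_alt filelist
  exact final_eq filelist
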